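-- pv_equiv track=rewrite | github.com/se4u/genrich | src/util_oneliner.py | batcher
-- ===== SOURCE A (Python) =====
-- def batcher(itr, batch_size):
--     """
--     >>> list(batcher(["I love\n","people who.", "Doh ! "], 2))
--     [[['I', 'love'], ['people', 'who.']], [['Doh', '!']]]
--     """
--     l=[]
--     for row in itr:
--         e=row.strip().split()
--         if len(e) > 0:
--             l.append(e)
--         if len(l)==batch_size:
--             yield l
--             l=[]
--     yield l
-- ===== SOURCE B (Python) =====
-- def batcher(itr, batch_size):
--     # Tokenize and filter once, then chunk the resulting list by slicing.
--     rows = [e for row in itr if (e := row.strip().split())]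
--     if batch_size <= 0:
--         return [rows]
--     out = []
--     while len(rows) >= batch_size:
--         out.append(rows[:batch_size])
--         rows = rows[batch_size:]
--     out.append(rows)
--     return out
-- ===== Notes on version B (the rewrite author's own statement) =====
-- stated objective: simpler
-- what changed: A interleaves tokenizing, filtering and batch-flushing in one stateful accumulator loop; B builds the filtered tokenized rows in one comprehension and then chunks that list by slicing, treating non-positive batch_size as 'no batching' (one batch).
-- intended difference: When batch_size is 0 and the input begins with blank rows, A yields one spurious empty batch per leading blank row (an artefact of its len(l)==batch_size flush test) before the batch of all rows; B returns just that single batch, the intended 'no batching' value. — e.g. on batcher([""], 0): A returns [[], []], B returns [[]]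
import Mathlib
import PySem

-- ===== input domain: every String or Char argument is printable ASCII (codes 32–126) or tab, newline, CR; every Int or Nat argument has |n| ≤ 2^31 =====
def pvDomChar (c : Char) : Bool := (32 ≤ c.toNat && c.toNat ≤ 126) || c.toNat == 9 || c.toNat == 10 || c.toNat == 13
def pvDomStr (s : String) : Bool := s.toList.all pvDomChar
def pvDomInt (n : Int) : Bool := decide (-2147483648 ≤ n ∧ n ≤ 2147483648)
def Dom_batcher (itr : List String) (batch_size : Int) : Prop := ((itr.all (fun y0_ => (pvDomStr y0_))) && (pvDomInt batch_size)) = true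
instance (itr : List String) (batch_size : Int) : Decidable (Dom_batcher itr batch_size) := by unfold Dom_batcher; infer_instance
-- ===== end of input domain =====

-- B replaces A's interleaved accumulate-and-flush generator by two phases — tokenize/filter
-- once, then chunk the filtered list by slicing (objective: simpler decomposition, same cost).
-- A is a generator; equivalence is about the list of its yields.

-- ===== PORT A =====
-- row.strip().split()
def pvTok (row : String) : List String := PySem.Str.split₀ (PySem.Str.strip row)

-- the body of A's `for row in itr` loop, acting on the state (yields so far, l)
def pvStepA (batch_size : Int) (st : List (List (List String)) × List (List String))
    (row : String) : List (List (List String)) × List (List String) :=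
  let e := pvTok row
  let l := if e.length > 0 then st.2 ++ [e] else st.2
  if (l.length : Int) = batch_size then (st.1 ++ [l], []) else (st.1, l)

def batcher (itr : List String) (batch_size : Int) : List (List (List String)) :=
  let st := itr.foldl (pvStepA batch_size) ([], [])
  st.1 ++ [st.2]    -- the final `yield l`

-- ===== PORT B =====
-- Source B's `while len(rows) >= batch_size` slicing loop; the `0 < batch_size` conjunct only
-- makes the recursion terminating — the caller enters this loop only when batch_size > 0.
def pvChunk (batch_size : Int) (rows : List (List String)) : List (List (List String)) :=
  if h : 0 < batch_size ∧ batch_size ≤ (rows.length : Int) then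
    PySem.List.slice rows none (some batch_size) ::
      pvChunk batch_size (PySem.List.slice rows (some batch_size) none)
  else [rows]
termination_by rows.length
decreasing_by
  simp only [PySem.List.slice_from rows (le_of_lt h.1), List.length_drop]
  omega

def batcher_alt (itr : List String) (batch_size : Int) : List (List (List String)) :=
  let rows := (itr.map pvTok).filter (fun e => !e.isEmpty)
  if batch_size ≤ 0 then [rows] else pvChunk batch_size rows

-- ===== PRECONDITION & SPEC =====
-- When batch_size is 0 and the input begins with blank rows, A yields one spurious empty
-- batch per leading blank row (an artefact of its len(l)==batch_size flush test) before the
-- batch of all rows; B returns just that single batch, the intended 'no batching' value.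
def D_batcher (itr : List String) (batch_size : Int) : Prop :=
  batch_size = 0 ∧ match itr with
    | [] => False
    | row :: _ => (PySem.Str.split₀ (PySem.Str.strip row)).isEmpty = true
instance (itr : List String) (batch_size : Int) : Decidable (D_batcher itr batch_size) := by
  unfold D_batcher
  cases itr <;> infer_instance

def Spec_batcher (itr : List String) (batch_size : Int) (out : List (List (List String))) : Prop := ¬ D_batcher itr batch_size → out = batcher_alt itr batch_size
instance (itr : List String) (batch_size : Int) (out : List (List (List String))) : Decidable (Spec_batcher itr batch_size out) := by unfold Spec_batcher; infer_instance

def pvDiffWitness_batcher : List String × Int := ([""], 0)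
def pvDiffWitnessOut_batcher : (List (List (List String))) × (List (List (List String))) :=
  ([[], []], [[]])

-- ===== CLAIM (what is proved, stated in full; the proofs are below) =====
def Claim_unchanged_batcher : Prop := ∀ (itr : List String) (batch_size : Int), Dom_batcher itr batch_size → Spec_batcher itr batch_size (batcher itr batch_size)
def Claim_changed_batcher : Prop := Dom_batcher (pvDiffWitness_batcher.1) (pvDiffWitness_batcher.2) ∧ D_batcher (pvDiffWitness_batcher.1) (pvDiffWitness_batcher.2) ∧ batcher (pvDiffWitness_batcher.1) (pvDiffWitness_batcher.2) = pvDiffWitnessOut_batcher.1 ∧ batcher_alt (pvDiffWitness_batcher.1) (pvDiffWitness_batcher.2) = pvDiffWitnessOut_batcher.2 ∧ pvDiffWitnessOut_batcher.1 ≠ pvDiffWitnessOut_batcher.2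
def Claim_exact_batcher : Prop := ∀ (itr : List String) (batch_size : Int), Dom_batcher itr batch_size → D_batcher itr batch_size → batcher itr batch_size ≠ batcher_alt itr batch_size

-- ===== LEMMAS AND PROOFS =====

-- the filtered tokenized rows (Source B's `rows`)
def pvRows (itr : List String) : List (List String) :=
  (itr.map pvTok).filter (fun e => !e.isEmpty)

-- the number of leading blank rows of the input (proof-side only)
def pvLead : List String → Nat
  | [] => 0
  | row :: rest => if (pvTok row).isEmpty then pvLead rest + 1 else 0

theorem pvRows_nil : pvRows [] = [] := rfl

theorem pvRows_cons_empty {row : String} (h : (pvTok row).isEmpty = true) (rest : List String) :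
    pvRows (row :: rest) = pvRows rest := by
  simp [pvRows, h]

theorem pvRows_cons_nonempty {row : String} (h : ¬ (pvTok row).isEmpty = true) (rest : List String) :
    pvRows (row :: rest) = pvTok row :: pvRows rest := by
  simp [pvRows, h]

theorem pvChunk_short {batch_size : Int} {rows : List (List String)}
    (h : ¬ (0 < batch_size ∧ batch_size ≤ (rows.length : Int))) :
    pvChunk batch_size rows = [rows] := by
  rw [pvChunk.eq_def]; simp [h]

theorem pvChunk_step {batch_size : Int} {l rest : List (List String)}
    (hpos : 0 < batch_size) (hlen : (l.length : Int) = batch_size) :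
    pvChunk batch_size (l ++ rest) = l :: pvChunk batch_size rest := by
  rw [pvChunk.eq_def]
  have hg : 0 < batch_size ∧ batch_size ≤ ((l ++ rest).length : Int) := by
    constructor
    · exact hpos
    · simp only [List.length_append]; push_cast; omega
  rw [dif_pos hg]
  have h0 : (0:Int) ≤ batch_size := le_of_lt hpos
  rw [PySem.List.slice_to _ h0, PySem.List.slice_from _ h0]
  have ht : batch_size.toNat = l.length := by omega
  rw [ht, List.take_left, List.drop_left]

-- A's loop with positive batch_size: yields so far ++ chunks of (l ++ remaining rows)
theorem pvFold_pos (batch_size : Int) (hpos : 0 < batch_size) :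
    ∀ (itr : List String) (acc : List (List (List String))) (l : List (List String)),
      (l.length : Int) < batch_size →
      (itr.foldl (pvStepA batch_size) (acc, l)).1 ++ [(itr.foldl (pvStepA batch_size) (acc, l)).2]
        = acc ++ pvChunk batch_size (l ++ pvRows itr) := by
  intro itr
  induction itr with
  | nil =>
    intro acc l hl
    simp only [List.foldl_nil, pvRows_nil, List.append_nil]
    rw [pvChunk_short (by omega)]
  | cons row rest ih =>
    intro acc l hl
    by_cases he : (pvTok row).isEmpty = true
    · have hlen0 : (pvTok row).length = 0 := by simpa [List.isEmpty_iff_length_eq_zero] using he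
      have hstep : pvStepA batch_size (acc, l) row = (acc, l) := by
        simp [pvStepA, hlen0]
        omega
      rw [List.foldl_cons, hstep, ih acc l hl, pvRows_cons_empty he]
    · have hlenpos : 0 < (pvTok row).length := by
        rcases Nat.eq_zero_or_pos (pvTok row).length with h0 | h0
        · exact absurd (by simpa [List.isEmpty_iff_length_eq_zero] using h0) he
        · exact h0
      by_cases hfull : ((l ++ [pvTok row]).length : Int) = batch_size
      · have hstep : pvStepA batch_size (acc, l) row = (acc ++ [l ++ [pvTok row]], []) := by
          simp only [pvStepA, if_pos hlenpos]
          rw [if_pos hfull]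
        rw [List.foldl_cons, hstep, ih _ [] (by simpa using hpos), pvRows_cons_nonempty he]
        have : l ++ pvTok row :: pvRows rest = (l ++ [pvTok row]) ++ pvRows rest := by simp
        rw [this, pvChunk_step hpos hfull]
        simp
      · have hstep : pvStepA batch_size (acc, l) row = (acc, l ++ [pvTok row]) := by
          simp only [pvStepA, if_pos hlenpos]
          rw [if_neg hfull]
        rw [List.foldl_cons, hstep, ih acc _ (by simp at hfull ⊢; omega),
          pvRows_cons_nonempty he]
        simp

-- A's loop when the flush test can never fire (batch_size < 0, or batch_size = 0 and l ≠ [])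
theorem pvFold_stuck (batch_size : Int)
    (hbs : batch_size < 0 ∨ batch_size = 0) :
    ∀ (itr : List String) (acc : List (List (List String))) (l : List (List String)),
      (batch_size < 0 ∨ l ≠ []) →
      itr.foldl (pvStepA batch_size) (acc, l) = (acc, l ++ pvRows itr) := by
  intro itr
  induction itr with
  | nil => intro acc l _; simp [pvRows_nil]
  | cons row rest ih =>
    intro acc l hl
    have hlpos : (batch_size < 0 ∨ 0 < l.length) := by
      rcases hl with h | h
      · exact Or.inl h
      · exact Or.inr (List.length_pos_of_ne_nil h)
    by_cases he : (pvTok row).isEmpty = true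
    · have hlen0 : (pvTok row).length = 0 := by simpa [List.isEmpty_iff_length_eq_zero] using he
      have hstep : pvStepA batch_size (acc, l) row = (acc, l) := by
        simp [pvStepA, hlen0]
        rcases hbs with h | h <;> rcases hlpos with h' | h' <;> omega
      rw [List.foldl_cons, hstep, ih acc l hl, pvRows_cons_empty he]
    · have hlenpos : 0 < (pvTok row).length := by
        rcases Nat.eq_zero_or_pos (pvTok row).length with h0 | h0
        · exact absurd (by simpa [List.isEmpty_iff_length_eq_zero] using h0) he
        · exact h0
      have hstep : pvStepA batch_size (acc, l) row = (acc, l ++ [pvTok row]) := by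
        simp only [pvStepA, if_pos hlenpos]
        rw [if_neg (by simp; rcases hbs with h | h <;> omega)]
      rw [List.foldl_cons, hstep, ih acc _ (Or.inr (by simp)), pvRows_cons_nonempty he]
      simp

-- A's loop with batch_size = 0 starting from l = []
theorem pvFold_zero :
    ∀ (itr : List String) (acc : List (List (List String))),
      (itr.foldl (pvStepA 0) (acc, [])).1 ++ [(itr.foldl (pvStepA 0) (acc, [])).2]
        = acc ++ List.replicate (pvLead itr) [] ++ [pvRows itr] := by
  intro itr
  induction itr with
  | nil => intro acc; simp [pvRows_nil, pvLead]
  | cons row rest ih =>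
    intro acc
    by_cases he : (pvTok row).isEmpty = true
    · have hlen0 : (pvTok row).length = 0 := by simpa [List.isEmpty_iff_length_eq_zero] using he
      have hstep : pvStepA 0 (acc, []) row = (acc ++ [[]], []) := by
        simp [pvStepA, hlen0]
      rw [List.foldl_cons, hstep, ih (acc ++ [[]]), pvRows_cons_empty he]
      simp [pvLead, he, List.replicate_succ]
    · have hlenpos : 0 < (pvTok row).length := by
        rcases Nat.eq_zero_or_pos (pvTok row).length with h0 | h0
        · exact absurd (by simpa [List.isEmpty_iff_length_eq_zero] using h0) he
        · exact h0
      have hstep : pvStepA 0 (acc, []) row = (acc, [pvTok row]) := by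
        simp [pvStepA, hlenpos]
      rw [List.foldl_cons, hstep,
        pvFold_stuck 0 (Or.inr rfl) rest acc [pvTok row] (Or.inr (by simp)),
        pvRows_cons_nonempty he]
      simp [pvLead, he]

-- outside D_ with batch_size = 0 the input has no leading blank row
theorem pvLead_zero {itr : List String}
    (h : ¬ D_batcher itr 0) : pvLead itr = 0 := by
  cases itr with
  | nil => rfl
  | cons row rest =>
    have : ¬ (pvTok row).isEmpty = true := fun he => h ⟨rfl, he⟩
    simp [pvLead, this]

-- ===== VERDICT (by name: the statements are the Claim_ definitions above) =====
theorem batcher_spec : Claim_unchanged_batcher := by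
  intro itr batch_size _ hnD
  unfold batcher batcher_alt
  show _ = (if batch_size ≤ 0 then [pvRows itr] else pvChunk batch_size (pvRows itr))
  rcases lt_trichotomy batch_size 0 with hneg | hzero | hpos
  · rw [if_pos (le_of_lt hneg),
      pvFold_stuck batch_size (Or.inl hneg) itr [] [] (Or.inl hneg)]
    simp
  · subst hzero
    rw [if_pos le_rfl]
    have := pvFold_zero itr []
    rw [pvLead_zero hnD] at this
    simpa using this
  · rw [if_neg (by omega)]
    simpa using pvFold_pos batch_size hpos itr [] [] (by simpa using hpos)

theorem batcher_changed : Claim_changed_batcher := by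
  unfold Claim_changed_batcher; decide

theorem batcher_tight : Claim_exact_batcher := by
  intro itr batch_size _ hD
  obtain ⟨hbs, hhead⟩ := hD
  subst hbs
  have hlead : 1 ≤ pvLead itr := by
    cases itr with
    | nil => exact absurd hhead (by simp)
    | cons row rest =>
      have : (pvTok row).isEmpty = true := hhead
      simp [pvLead, this]
  have hA : batcher itr 0 = List.replicate (pvLead itr) [] ++ [pvRows itr] := by
    unfold batcher
    simpa using pvFold_zero itr []
  have hB : batcher_alt itr 0 = [pvRows itr] := by
    unfold batcher_alt
    rw [if_pos le_rfl]
    simp [pvRows]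
  intro hEq
  have hlen : (batcher itr 0).length = (batcher_alt itr 0).length := by rw [hEq]
  rw [hA, hB] at hlen
  simp at hlen
  omega
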